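-- pv_equiv track=rewrite | github.com/Stephvideo/Competitive-Programming | .history/e_20220614131336.py | subStringCheck
-- ===== SOURCE A (Python) =====
-- def subStringCheck(s, length, needed):
--     if length < needed:
--         return False
--
--     numOnes = s[0:length].count(1)
--     if numOnes == needed:
--         return True
--     for i in range(1, len(s) - length):
--         if s[i-1] != s[i-1 + length]:
--             if s[i-1] == 1:
--                 numOnes -= 1
--             else:
--                 numOnes += 1
--
--         if numOnes == needed:
--             return True
--     return False
-- ===== SOURCE B (Python) =====
-- def subStringCheck(s, length, needed):
--     for i in range(len(s) - length + 1):
--         if s[i:i + length].count(1) == needed: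
--             return True
--     return False
-- ===== Notes on version B (the rewrite author's own statement) =====
-- stated objective: simpler
-- what changed: B drops the incremental +1/-1 counter entirely and just recounts the ones of each window slice directly; Pre_ keeps the task's natural 0/1 domain, admitting other int values only where A's +/-1 update is never exercised (length < needed or a window at least the whole list), because on a genuine sliding pass over non-0/1 values that update does not track the number of ones; negative lengths (IndexError or wrapped negative indices) are excluded too.
-- intended difference: Where only the final length-window of a 0/1 list holds exactly `needed` ones A returns False (its loop stops one window early) while B returns True, and when length exceeds len(s) A counts the ones of the truncated whole list (possibly True) while B returns False since no full window of that length exists; B's complete-window semantics is the intended one. — e.g. on subStringCheck([0, 1], 1, 1): A returns false, B returns true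
-- outside the precondition, e.g. on subStringCheck([5, 7, 0], 1, 1): A returns True, B returns False; on subStringCheck([0, 1, 1], -1, 1): A returns False, B returns True; on subStringCheck([], -2, -3): A raises IndexError, B returns False
import Mathlib
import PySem

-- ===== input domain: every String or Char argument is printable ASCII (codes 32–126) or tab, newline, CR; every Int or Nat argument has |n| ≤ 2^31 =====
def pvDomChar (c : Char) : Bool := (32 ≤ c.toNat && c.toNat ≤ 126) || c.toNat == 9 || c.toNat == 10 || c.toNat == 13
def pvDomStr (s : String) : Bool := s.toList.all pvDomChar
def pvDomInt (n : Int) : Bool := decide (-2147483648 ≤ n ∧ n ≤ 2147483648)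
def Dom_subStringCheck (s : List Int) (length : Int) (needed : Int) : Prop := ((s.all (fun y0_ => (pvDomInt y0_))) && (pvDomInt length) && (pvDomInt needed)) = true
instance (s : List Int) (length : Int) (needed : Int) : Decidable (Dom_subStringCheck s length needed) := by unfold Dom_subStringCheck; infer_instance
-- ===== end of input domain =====

-- B drops A's incremental counter and recounts the ones of every window slice directly
-- (objective: simpler); A misses the last window, stated as an intended difference D_ below.

-- ===== PORT A =====
-- the for-loop: state numOnes, early `return True` as `true`
def pvALoop (s : List Int) (length needed : Int) : List Int → Int → Bool
  | [], _ => false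
  | i :: rest, numOnes =>
    let numOnes' :=
      if PySem.List.pyGetD s (i - 1) 0 ≠ PySem.List.pyGetD s (i - 1 + length) 0 then
        -- inside Pre_ these indices are in range; 0 is an arbitrary default
        if PySem.List.pyGetD s (i - 1) 0 = 1 then numOnes - 1 else numOnes + 1
      else numOnes
    if numOnes' = needed then true else pvALoop s length needed rest numOnes'

def subStringCheck (s : List Int) (length : Int) (needed : Int) : Bool :=
  if length < needed then false
  else
    let numOnes : Int := (PySem.List.count (PySem.List.slice s (some 0) (some length)) 1 : Nat)
    if numOnes = needed then true
    else pvALoop s length needed (PySem.List.pyRange 1 ((s.length : Int) - length) 1) numOnes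

-- ===== PORT B =====
-- `for i in range(len(s) - length + 1): if s[i:i+length].count(1) == needed: return True` / `return False`
def subStringCheck_alt (s : List Int) (length : Int) (needed : Int) : Bool :=
  (PySem.List.pyRange 0 ((s.length : Int) - length + 1) 1).any (fun i =>
    ((PySem.List.count (PySem.List.slice s (some i) (some (i + length))) 1 : Nat) : Int) == needed)

-- ===== PRECONDITION & SPEC =====
-- The task's natural domain is 0/1 arrays: Pre_ admits lists with other int values only where A's
-- +/-1 update is never exercised (length < needed, or a window at least the whole list), because on a
-- genuine sliding pass over non-0/1 values that update does not track the number of ones; negative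
-- lengths (IndexError or wrapped negative indices) are excluded as well.
def Pre_subStringCheck (s : List Int) (length : Int) (needed : Int) : Prop :=
  0 ≤ length ∧
    (length < needed ∨ (s.length : Int) ≤ length ∨ ∀ x ∈ s, x = 0 ∨ x = 1)
instance (s : List Int) (length : Int) (needed : Int) : Decidable (Pre_subStringCheck s length needed) := by unfold Pre_subStringCheck; infer_instance

def pvWitness_subStringCheck : List Int × Int × Int := ([1, 0, 1, 1], 2, 2)

-- Where only the final length-window of a 0/1 list holds exactly `needed` ones A returns False (its
-- loop stops one window early) while B returns True, and when length exceeds len(s) A counts the ones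
-- of the truncated whole list (possibly True) while B returns False since no full window of that
-- length exists; B's complete-window semantics is the intended one.
def D_subStringCheck (s : List Int) (length : Int) (needed : Int) : Prop :=
  0 ≤ length ∧
    (((s.length : Int) < length ∧ ((s.count 1 : Nat) : Int) = needed) ∨
     ((∀ x ∈ s, x = 0 ∨ x = 1) ∧ length + 1 ≤ (s.length : Int) ∧
      (((s.drop (s.length - length.toNat)).count 1 : Nat) : Int) = needed ∧
      ∀ k ∈ List.range (s.length - length.toNat),
        ((((s.drop k).take length.toNat).count 1 : Nat) : Int) ≠ needed))
instance (s : List Int) (length : Int) (needed : Int) : Decidable (D_subStringCheck s length needed) := by unfold D_subStringCheck; infer_instance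

def Spec_subStringCheck (s : List Int) (length : Int) (needed : Int) (out : Bool) : Prop := ¬ D_subStringCheck s length needed → out = subStringCheck_alt s length needed
instance (s : List Int) (length : Int) (needed : Int) (out : Bool) : Decidable (Spec_subStringCheck s length needed out) := by unfold Spec_subStringCheck; infer_instance

def pvDiffWitness_subStringCheck : List Int × Int × Int := ([0, 1], 1, 1)
def pvDiffWitnessOut_subStringCheck : Bool × Bool := (false, true)

-- ===== CLAIM (what is proved, stated in full; the proofs are below) =====
def Claim_unchanged_subStringCheck : Prop := ∀ (s : List Int) (length : Int) (needed : Int), Dom_subStringCheck s length needed → Pre_subStringCheck s length needed → Spec_subStringCheck s length needed (subStringCheck s length needed)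
def Claim_changed_subStringCheck : Prop := Dom_subStringCheck (pvDiffWitness_subStringCheck.1) (pvDiffWitness_subStringCheck.2.1) (pvDiffWitness_subStringCheck.2.2) ∧ Pre_subStringCheck (pvDiffWitness_subStringCheck.1) (pvDiffWitness_subStringCheck.2.1) (pvDiffWitness_subStringCheck.2.2) ∧ D_subStringCheck (pvDiffWitness_subStringCheck.1) (pvDiffWitness_subStringCheck.2.1) (pvDiffWitness_subStringCheck.2.2) ∧ subStringCheck (pvDiffWitness_subStringCheck.1) (pvDiffWitness_subStringCheck.2.1) (pvDiffWitness_subStringCheck.2.2) = pvDiffWitnessOut_subStringCheck.1 ∧ subStringCheck_alt (pvDiffWitness_subStringCheck.1) (pvDiffWitness_subStringCheck.2.1) (pvDiffWitness_subStringCheck.2.2) = pvDiffWitnessOut_subStringCheck.2 ∧ pvDiffWitnessOut_subStringCheck.1 ≠ pvDiffWitnessOut_subStringCheck.2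
def Claim_exact_subStringCheck : Prop := ∀ (s : List Int) (length : Int) (needed : Int), Dom_subStringCheck s length needed → Pre_subStringCheck s length needed → D_subStringCheck s length needed → subStringCheck s length needed ≠ subStringCheck_alt s length needed

-- ===== LEMMAS AND PROOFS =====

-- count of ones in the window starting at k (window length l)
def pvCntI (s : List Int) (l : Nat) (k : Nat) : Int := (((s.drop k).take l).count 1 : Nat)

-- the common counter-update step, on a pair (outgoing, incoming)
def pvStep (c : Int) (p : Int × Int) : Int :=
  if p.1 ≠ p.2 then (if p.1 = 1 then c - 1 else c + 1) else c

-- A's loop rephrased over the list of pairs it reads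
def pvLoopP (needed : Int) : List (Int × Int) → Int → Bool
  | [], _ => false
  | p :: ps, c => if pvStep c p = needed then true else pvLoopP needed ps (pvStep c p)

-- the list of successive counter values
def pvSums : List (Int × Int) → Int → List Int
  | [], c => [c]
  | p :: ps, c => c :: pvSums ps (pvStep c p)

lemma pvALoop_eq_loopP (s : List Int) (length needed : Int) :
    ∀ (r : List Int) (c : Int),
      pvALoop s length needed r c =
        pvLoopP needed (r.map fun i => (PySem.List.pyGetD s (i - 1) 0, PySem.List.pyGetD s (i - 1 + length) 0)) c := by
  intro r
  induction r with
  | nil => intro c; rfl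
  | cons i rest ih =>
    intro c
    simp only [pvALoop, pvLoopP, List.map_cons, pvStep, ih]

lemma pvLoopP_or (needed : Int) :
    ∀ (ps : List (Int × Int)) (c : Int),
      (decide (c = needed) || pvLoopP needed ps c) = (pvSums ps c).contains needed := by
  intro ps
  induction ps with
  | nil =>
    intro c
    simp [pvLoopP, pvSums, eq_comm]
  | cons p ps ih =>
    intro c
    simp only [pvLoopP, pvSums, List.contains_cons, ← ih (pvStep c p)]
    by_cases h1 : c = needed <;> by_cases h2 : pvStep c p = needed <;> simp [h1, h2]
    intro h; exact absurd h.symm h1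

-- the sliding-window identity: on 0/1 values the +/-1 step moves one window forward
lemma pvSlide (s : List Int) (l : Nat) (j : Nat)
    (hbin : ∀ x ∈ s, x = 0 ∨ x = 1) (h : j + l < s.length) :
    pvStep (pvCntI s l j) (s.getD j 0, s.getD (j + l) 0) = pvCntI s l (j + 1) := by
  rcases Nat.eq_zero_or_pos l with hl | hl
  · subst hl
    simp [pvCntI, pvStep]
  · obtain ⟨l', rfl⟩ : ∃ l', l = l' + 1 := ⟨l - 1, by omega⟩
    have hj : j < s.length := by omega
    have hjl : j + 1 + l' < s.length := by omega
    have ha := hbin s[j] (List.getElem_mem hj)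
    have hb := hbin s[j + 1 + l'] (List.getElem_mem hjl)
    have e1 : (s.drop j).take (l' + 1) = s[j] :: (s.drop (j + 1)).take l' := by
      rw [List.drop_eq_getElem_cons hj, List.take_succ_cons]
    have e2 : (s.drop (j + 1)).take (l' + 1) = (s.drop (j + 1)).take l' ++ [s[j + 1 + l']] := by
      rw [List.take_add_one, List.getElem?_drop, List.getElem?_eq_getElem hjl]
      rfl
    have g1 : s.getD j 0 = s[j] := List.getD_eq_getElem s 0 hj
    have g2 : s.getD (j + (l' + 1)) 0 = s[j + 1 + l'] := by
      have e : j + (l' + 1) = j + 1 + l' := by omega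
      rw [e]; exact List.getD_eq_getElem s 0 hjl
    unfold pvCntI pvStep
    simp only [g1, g2, e1, e2]
    simp only [List.count_cons, List.count_append]
    rcases ha with ha | ha <;> rcases hb with hb | hb <;>
      simp [ha, hb]

-- pvSums over the pair list is the list of window counts
lemma pvSums_eq (s : List Int) (l : Nat) (hbin : ∀ x ∈ s, x = 0 ∨ x = 1) :
    ∀ (m j : Nat), m = 0 ∨ j + m + l ≤ s.length →
      pvSums ((List.range m).map fun t => (s.getD (j + t) 0, s.getD (j + t + l) 0)) (pvCntI s l j)
        = (List.range (m + 1)).map fun k => pvCntI s l (j + k) := by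
  intro m
  induction m with
  | zero => intro j _; simp [pvSums]
  | succ m ih =>
    intro j h
    have hbound : j + (m + 1) + l ≤ s.length := by omega
    rw [List.range_succ_eq_map, List.range_succ_eq_map]
    simp only [List.map_cons, List.map_map, pvSums]
    have hstep : pvStep (pvCntI s l j) (s.getD (j + 0) 0, s.getD (j + 0 + l) 0)
        = pvCntI s l (j + 1) := by
      simpa using pvSlide s l j hbin (by omega)
    rw [hstep]
    have harg : ((fun t => (s.getD (j + t) 0, s.getD (j + t + l) 0)) ∘ Nat.succ)
        = fun t => (s.getD (j + 1 + t) 0, s.getD (j + 1 + t + l) 0) := by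
      funext t
      simp only [Function.comp_apply, Nat.succ_eq_add_one]
      have e1 : j + (t + 1) = j + 1 + t := by omega
      rw [e1]
    rw [harg, ih (j + 1) (by omega)]
    refine congrArg₂ List.cons (by simp) (List.map_congr_left ?_)
    intro k _
    simp only [Function.comp_apply, Nat.succ_eq_add_one]
    have e2 : j + (k + 1) = j + 1 + k := by omega
    rw [e2]

-- characterisation of port A on the natural domain, needed ≤ l
lemma pvA_char (s : List Int) (l : Nat) (needed : Int)
    (hbin : ∀ x ∈ s, x = 0 ∨ x = 1) (hnl : needed ≤ (l : Int)) :
    (subStringCheck s l needed = true ↔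
      ∃ k ∈ List.range (((s.length : Int) - l - 1).toNat + 1), pvCntI s l k = needed) := by
  unfold subStringCheck
  rw [if_neg (not_lt.mpr hnl)]
  rw [PySem.List.slice_zero_start, PySem.List.slice_to_natCast, PySem.List.count_eq]
  simp only [pvALoop_eq_loopP, PySem.List.pyRange_one, List.map_map]
  have hf : ((fun i => (PySem.List.pyGetD s (i - 1) 0, PySem.List.pyGetD s (i - 1 + (l : Int)) 0)) ∘
        fun k : Nat => (1 : Int) + k) = fun t : Nat => (s.getD (0 + t) 0, s.getD (0 + t + l) 0) := by
    funext t
    simp only [Function.comp_apply]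
    have e1 : (1 : Int) + t - 1 = ((t : Nat) : Int) := by push_cast; ring
    rw [e1]
    have e2 : ((t : Nat) : Int) + (l : Int) = (((t + l : Nat)) : Int) := by push_cast; ring
    rw [e2, PySem.List.pyGetD_natCast, PySem.List.pyGetD_natCast]
    simp
  rw [hf]
  have hc0 : ((List.count 1 (s.take l) : Nat) : Int) = pvCntI s l 0 := by simp [pvCntI]
  simp only [hc0]
  have hite : ∀ (c : Int) (X : Bool),
      (if c = needed then true else X) = (decide (c = needed) || X) := by
    intro c X; by_cases h : c = needed <;> simp [h]
  rw [hite, pvLoopP_or needed]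
  rw [pvSums_eq s l hbin (((s.length : Int) - (l : Int) - 1).toNat) 0 (by omega)]
  simp only [List.contains_iff_mem, List.mem_map, List.mem_range, zero_add]

-- characterisation of port B
lemma pvB_char (s : List Int) (l : Nat) (needed : Int) :
    (subStringCheck_alt s l needed = true ↔
      ∃ k ∈ List.range (((s.length : Int) - l + 1).toNat), pvCntI s l k = needed) := by
  unfold subStringCheck_alt
  rw [PySem.List.pyRange_one]
  simp only [List.any_map, List.any_eq_true, Function.comp_apply, zero_add, sub_zero,
    PySem.List.slice_natCast_add, PySem.List.count_eq, beq_iff_eq, List.mem_range, pvCntI]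

-- characterisation of port A when the (clipped) first window is the whole list: the loop is empty
lemma pvA_bigL (s : List Int) (l : Nat) (needed : Int)
    (hn : s.length ≤ l) (hnl : needed ≤ (l : Int)) :
    (subStringCheck s l needed = true ↔ ((s.count 1 : Nat) : Int) = needed) := by
  unfold subStringCheck
  rw [if_neg (not_lt.mpr hnl)]
  rw [PySem.List.slice_zero_start, PySem.List.slice_to_natCast, PySem.List.count_eq]
  rw [PySem.List.pyRange_one_eq_nil (by omega)]
  rw [List.take_of_length_le (by omega)]
  by_cases h : ((List.count 1 s : Nat) : Int) = needed <;> simp [h, pvALoop]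

-- a window of length l never holds more than l ones
lemma pvCntI_le (s : List Int) (l k : Nat) : pvCntI s l k ≤ (l : Int) := by
  unfold pvCntI
  have h1 := List.count_le_length (l := (s.drop k).take l) (a := (1 : Int))
  have h2 := List.length_take_le l (s.drop k)
  omega

-- ===== VERDICT (by name: the statement is the Claim_ definition above) =====
theorem subStringCheck_spec : Claim_unchanged_subStringCheck := by
  intro s L needed _ hpre hnd
  obtain ⟨h0, hbin'⟩ := hpre
  obtain ⟨l, rfl⟩ : ∃ l : Nat, L = (l : Int) := ⟨L.toNat, (Int.toNat_of_nonneg h0).symm⟩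
  by_cases hlt : (l : Int) < needed
  · have hA : subStringCheck s l needed = false := by
      unfold subStringCheck; rw [if_pos hlt]
    have hB : subStringCheck_alt s l needed = false := by
      rw [← Bool.not_eq_true, pvB_char]
      rintro ⟨k, -, hk⟩
      have h1 := pvCntI_le s l k
      have h2 : (0 : Int) ≤ pvCntI s l k := Int.natCast_nonneg _
      omega
    rw [hA, hB]
  · have hnl : needed ≤ (l : Int) := by omega
    have hX : ¬(((s.length : Int) < (l : Int) ∧ ((s.count 1 : Nat) : Int) = needed) ∨
        ((∀ x ∈ s, x = 0 ∨ x = 1) ∧ (l : Int) + 1 ≤ (s.length : Int) ∧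
         (((s.drop (s.length - (l : Int).toNat)).count 1 : Nat) : Int) = needed ∧
         ∀ k ∈ List.range (s.length - (l : Int).toNat),
           ((((s.drop k).take (l : Int).toNat).count 1 : Nat) : Int) ≠ needed)) := by
      intro hx
      exact hnd ⟨Int.natCast_nonneg _, hx⟩
    simp only [Int.toNat_natCast] at hX
    rw [Bool.eq_iff_iff]
    by_cases hn : s.length < l
    · rw [pvA_bigL s l needed (by omega) hnl, pvB_char s l needed]
      have hRB : ((s.length : Int) - l + 1).toNat = 0 := by omega
      have hne : ((s.count 1 : Nat) : Int) ≠ needed := by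
        intro h; exact hX (Or.inl ⟨by exact_mod_cast hn, h⟩)
      rw [hRB]
      simp [hne]
    · by_cases he : s.length = l
      · rw [pvA_bigL s l needed (by omega) hnl, pvB_char s l needed]
        have hRB : ((s.length : Int) - l + 1).toNat = 1 := by omega
        rw [hRB]
        have hc : pvCntI s l 0 = ((s.count 1 : Nat) : Int) := by
          unfold pvCntI; rw [List.drop_zero, List.take_of_length_le (by omega)]
        simp [hc]
      · have hge : l + 1 ≤ s.length := by omega
        have hbin : ∀ x ∈ s, x = 0 ∨ x = 1 := by
          rcases hbin' with h | h | h
          · omega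
          · omega
          · exact h
        rw [pvA_char s l needed hbin hnl, pvB_char s l needed]
        have hRA : ((s.length : Int) - l - 1).toNat + 1 = s.length - l := by omega
        have hRB : ((s.length : Int) - l + 1).toNat = s.length - l + 1 := by omega
        rw [hRA, hRB]
        constructor
        · rintro ⟨k, hk, hc⟩
          refine ⟨k, ?_, hc⟩
          simp only [List.mem_range] at hk ⊢
          omega
        · rintro ⟨k, hk, hc⟩
          simp only [List.mem_range] at hk
          by_cases hklt : k < s.length - l
          · exact ⟨k, List.mem_range.mpr hklt, hc⟩
          · have hkeq : k = s.length - l := by omega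
            subst hkeq
            have hlast : (((s.drop (s.length - l)).count 1 : Nat) : Int) = needed := by
              rw [← hc]; unfold pvCntI
              rw [List.take_of_length_le (by rw [List.length_drop]; omega)]
            by_contra hno
            push Not at hno
            exact hX (Or.inr ⟨hbin, by exact_mod_cast hge, hlast,
              fun k' hk' => by simpa [pvCntI] using hno k' hk'⟩)

theorem subStringCheck_changed : Claim_changed_subStringCheck := by
  unfold Claim_changed_subStringCheck; decide

theorem subStringCheck_tight : Claim_exact_subStringCheck := by
  intro s L needed _ hpre hD
  obtain ⟨h0, -⟩ := hpre
  obtain ⟨l, rfl⟩ : ∃ l : Nat, L = (l : Int) := ⟨L.toNat, (Int.toNat_of_nonneg h0).symm⟩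
  obtain ⟨-, hX⟩ := hD
  simp only [Int.toNat_natCast] at hX
  rcases hX with ⟨hn, hc⟩ | ⟨hbin, hge, hlast, hall⟩
  · have hcl : (s.count 1 : Int) ≤ (s.length : Int) := by
      exact_mod_cast List.count_le_length (l := s) (a := (1 : Int))
    have hnl : needed ≤ (l : Int) := by omega
    have hA : subStringCheck s l needed = true := by
      rw [pvA_bigL s l needed (by omega) hnl]
      exact hc
    have hB : subStringCheck_alt s l needed = false := by
      rw [← Bool.not_eq_true, pvB_char]
      rintro ⟨k, hk, -⟩
      simp only [List.mem_range] at hk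
      omega
    rw [hA, hB]; simp
  · have hge' : l + 1 ≤ s.length := by exact_mod_cast hge
    have hA : subStringCheck s l needed = false := by
      have hwl : (((s.drop (s.length - l)).count 1 : Nat) : Int) ≤ (l : Int) := by
        have h1 := List.count_le_length (l := s.drop (s.length - l)) (a := (1 : Int))
        have h2 : (s.drop (s.length - l)).length = l := by rw [List.length_drop]; omega
        omega
      have hnl : needed ≤ (l : Int) := by omega
      rw [← Bool.not_eq_true, pvA_char s l needed hbin hnl]
      rintro ⟨k, hk, hck⟩
      simp only [List.mem_range] at hk
      have hk' : k < s.length - l := by omega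
      exact hall k (List.mem_range.mpr hk') (by simpa [pvCntI] using hck)
    have hB : subStringCheck_alt s l needed = true := by
      rw [pvB_char]
      refine ⟨s.length - l, List.mem_range.mpr (by omega), ?_⟩
      unfold pvCntI
      rw [List.take_of_length_le (by rw [List.length_drop]; omega)]
      exact hlast
    rw [hA, hB]; simp
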